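-- pv_equiv track=rewrite | github.com/perashanid/Leetcode-solutions | medium/3001-maximum-subarray-sum-after-one-operation.py | max_subarray_sum_after_one_operation
-- ===== SOURCE A (Python) =====
-- def max_subarray_sum_after_one_operation(nums, x):
--     """
--     Calculates the maximum possible subarray sum after performing at most one operation:
--     choosing an element and multiplying it by x.
--
--     Args:
--         nums: A list of integers.
--         x: An integer multiplier.
--
--     Returns:
--         The maximum possible subarray sum after performing at most one operation.
--     """
--
--     n = len(nums)
--     # max_so_far[i][0]: max subarray sum ending at i without using the operation
--     # max_so_far[i][1]: max subarray sum ending at i using the operation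
--     max_so_far = [[0, 0] for _ in range(n)]
--
--     # Initialize the first element
--     max_so_far[0][0] = nums[0]
--     max_so_far[0][1] = nums[0] * x
--
--     max_sum = max(max_so_far[0][0], max_so_far[0][1])
--
--     for i in range(1, n):
--         # Calculate max_so_far[i][0]
--         max_so_far[i][0] = max(nums[i], max_so_far[i - 1][0] + nums[i])
--
--         # Calculate max_so_far[i][1]
--         # Case 1: Use the operation on nums[i]
--         # Case 2: Use the operation on a previous element in the subarray
--         max_so_far[i][1] = max(nums[i] * x, max(max_so_far[i - 1][0] + nums[i] * x, max_so_far[i - 1][1] + nums[i]))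
--
--         max_sum = max(max_sum, max_so_far[i][0], max_so_far[i][1])
--
--     return max_sum
-- ===== SOURCE B (Python) =====
-- def max_subarray_sum_after_one_operation(nums, x):
--     n = len(nums)
--     L = [0] * n
--     R = [0] * n
--     # forward Kadane: L[i] = max subarray sum ending at i
--     L[0] = nums[0]
--     for i in range(1, n):
--         L[i] = max(nums[i], L[i - 1] + nums[i])
--     # backward Kadane: R[i] = max subarray sum starting at i
--     R[n - 1] = nums[n - 1]
--     for i in range(n - 2, -1, -1):
--         R[i] = max(nums[i], nums[i] + R[i + 1])
--     # no-operation case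
--     best = max(L)
--     # operation applied at index j: optional best left part + nums[j]*x + optional best right part
--     for j in range(n):
--         left = max(L[j - 1], 0) if j > 0 else 0
--         right = max(R[j + 1], 0) if j < n - 1 else 0
--         best = max(best, left + nums[j] * x + right)
--     return best
-- ===== Notes on version B (the rewrite author's own statement) =====
-- stated objective: alternative
-- what changed: Replaced A's single forward DP that carries a (no-op, with-op) state pair with two independent Kadane arrays (forward L of best sums ending at i, backward R of best sums starting at i) plus a final combining pass that glues max(0,L[j-1]) + nums[j]*x + max(0,R[j+1]) for each j.
import Mathlib
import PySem

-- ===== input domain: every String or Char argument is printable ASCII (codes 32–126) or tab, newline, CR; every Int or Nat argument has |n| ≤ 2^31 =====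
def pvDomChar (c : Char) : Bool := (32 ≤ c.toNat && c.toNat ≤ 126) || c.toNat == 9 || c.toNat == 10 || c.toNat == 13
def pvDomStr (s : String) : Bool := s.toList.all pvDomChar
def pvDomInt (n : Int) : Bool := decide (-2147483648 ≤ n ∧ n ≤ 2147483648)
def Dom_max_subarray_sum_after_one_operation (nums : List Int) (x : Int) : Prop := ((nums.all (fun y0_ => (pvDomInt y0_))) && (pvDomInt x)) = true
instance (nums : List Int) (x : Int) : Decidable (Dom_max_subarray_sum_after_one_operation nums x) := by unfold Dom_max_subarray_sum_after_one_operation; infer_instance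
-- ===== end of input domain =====

-- B replaces A's single forward DP carrying a (no-op, with-op) state pair by two independent
-- Kadane arrays (forward L, backward R) glued at the multiplied element (objective: alternative).

-- ===== PORT A =====
-- the loop over range(1, n); the state is (max_so_far[i-1][0], max_so_far[i-1][1], max_sum)
def pvGoA (x : Int) (st : Int × Int × Int) : List Int → Int × Int × Int
  | [] => st
  | v :: rest =>
      let m0 := max v (st.1 + v)
      let m1 := max (v * x) (max (st.1 + v * x) (st.2.1 + v))
      pvGoA x (m0, m1, max st.2.2 (max m0 m1)) rest

def max_subarray_sum_after_one_operation (nums : List Int) (x : Int) : Int :=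
  match nums with
  | [] => 0   -- Python raises IndexError here (nums[0]); excluded by Pre_
  | v :: rest => (pvGoA x (v, v * x, max v (v * x)) rest).2.2

-- ===== PORT B =====
-- forward Kadane array L (loop over range(1, n)); prev is L[i-1]
def pvBuildL (prev : Int) : List Int → List Int
  | [] => []
  | v :: rest => let cur := max v (prev + v); cur :: pvBuildL cur rest

-- backward Kadane array R (R[n-1] = nums[n-1]; loop over range(n-2, -1, -1))
def pvBuildR : List Int → List Int
  | [] => []
  | [v] => [v]
  | v :: w :: t => let r := pvBuildR (w :: t); max v (v + r.headD 0) :: r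

def max_subarray_sum_after_one_operation_alt (nums : List Int) (x : Int) : Int :=
  match nums with
  | [] => 0   -- Python raises IndexError here (L[0]); excluded by Pre_
  | v :: rest =>
    let n := (v :: rest).length
    let L := v :: pvBuildL v rest
    let R := pvBuildR (v :: rest)
    let best0 := L.tail.foldl max v        -- best = max(L)
    (List.range n).foldl (fun best j =>
        let left := if 0 < j then max (L.getD (j - 1) 0) 0 else 0
        let right := if j < n - 1 then max (R.getD (j + 1) 0) 0 else 0
        max best (left + (v :: rest).getD j 0 * x + right)) best0

-- ===== PRECONDITION & SPEC =====
-- Python A (and B) raises IndexError on the empty list (nums[0]); that is the only exclusion.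
def Pre_max_subarray_sum_after_one_operation (nums : List Int) (x : Int) : Prop := nums ≠ []
instance (nums : List Int) (x : Int) : Decidable (Pre_max_subarray_sum_after_one_operation nums x) := by unfold Pre_max_subarray_sum_after_one_operation; infer_instance

def pvWitness_max_subarray_sum_after_one_operation : List Int × Int := ([1, -2, 3], 2)

def Spec_max_subarray_sum_after_one_operation (nums : List Int) (x : Int) (out : Int) : Prop := out = max_subarray_sum_after_one_operation_alt nums x
instance (nums : List Int) (x : Int) (out : Int) : Decidable (Spec_max_subarray_sum_after_one_operation nums x out) := by unfold Spec_max_subarray_sum_after_one_operation; infer_instance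

-- ===== CLAIM (what is proved, stated in full; the proofs are below) =====
def Claim_equal_max_subarray_sum_after_one_operation : Prop := ∀ (nums : List Int) (x : Int), Dom_max_subarray_sum_after_one_operation nums x → Pre_max_subarray_sum_after_one_operation nums x → Spec_max_subarray_sum_after_one_operation nums x (max_subarray_sum_after_one_operation nums x)

-- ===== LEMMAS AND PROOFS =====

-- element access and segment sums of the input list
def pvG (ns : List Int) (k : ℕ) : Int := ns.getD k 0
def pvSeg (ns : List Int) (a b : ℕ) : Int := ∑ k ∈ Finset.Ico a b, pvG ns k

-- A's DP values: pvEv i = max subarray sum ending at i (no op), pvCv i = with one op,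
-- pvAns i = running maximum, defined exactly by A's recurrences
def pvEv (ns : List Int) : ℕ → Int
  | 0 => pvG ns 0
  | i + 1 => max (pvG ns (i+1)) (pvEv ns i + pvG ns (i+1))

def pvCv (ns : List Int) (x : Int) : ℕ → Int
  | 0 => pvG ns 0 * x
  | i + 1 => max (pvG ns (i+1) * x) (max (pvEv ns i + pvG ns (i+1) * x) (pvCv ns x i + pvG ns (i+1)))

def pvAns (ns : List Int) (x : Int) : ℕ → Int
  | 0 => max (pvEv ns 0) (pvCv ns x 0)
  | i + 1 => max (pvAns ns x i) (max (pvEv ns (i+1)) (pvCv ns x (i+1)))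

-- B's backward value: max subarray sum starting at the head
def pvSv : List Int → Int
  | [] => 0
  | [v] => v
  | v :: w :: t => max v (v + pvSv (w :: t))

def pvLeft (ns : List Int) (j : ℕ) : Int := if 0 < j then max (pvEv ns (j - 1)) 0 else 0
def pvRight (ns : List Int) (j : ℕ) : Int := if j < ns.length - 1 then max (pvSv (ns.drop (j+1))) 0 else 0
def pvTerm (ns : List Int) (x : Int) (j : ℕ) : Int := pvLeft ns j + pvG ns j * x + pvRight ns j

-- segment-sum facts
lemma pvSeg_self (ns : List Int) (a : ℕ) : pvSeg ns a a = 0 := by simp [pvSeg]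

lemma pvSeg_succ_top (ns : List Int) {a b : ℕ} (h : a ≤ b) :
    pvSeg ns a (b+1) = pvSeg ns a b + pvG ns b := by
  simp [pvSeg, Finset.sum_Ico_succ_top h]

lemma pvSeg_split (ns : List Int) {a b c : ℕ} (h1 : a ≤ b) (h2 : b ≤ c) :
    pvSeg ns a c = pvSeg ns a b + pvSeg ns b c := by
  simp [pvSeg, (Finset.sum_Ico_consecutive _ h1 h2).symm]

lemma pvSeg_single (ns : List Int) (a : ℕ) : pvSeg ns a (a+1) = pvG ns a := by
  rw [pvSeg_succ_top ns (le_refl a), pvSeg_self]; ring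

lemma pv_drop_cons (ns : List Int) {k : ℕ} (h : k < ns.length) :
    ns.drop k = ns.getD k 0 :: ns.drop (k+1) := by
  rw [List.drop_eq_getElem_cons h, List.getD_eq_getElem ns 0 h]

lemma map_range_succ_shift (f : ℕ → Int) (m : ℕ) :
    (List.range (m+1)).map f = f 0 :: (List.range m).map (fun j => f (j+1)) := by
  rw [List.range_succ_eq_map, List.map_cons, List.map_map]
  rfl

-- A's fold invariant
lemma pvGoA_inv (ns : List Int) (x : Int) :
    ∀ (l : List Int) (k : ℕ), k < ns.length → l = ns.drop (k+1) →
    pvGoA x (pvEv ns k, pvCv ns x k, pvAns ns x k) l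
      = (pvEv ns (ns.length - 1), pvCv ns x (ns.length - 1), pvAns ns x (ns.length - 1)) := by
  intro l
  induction l with
  | nil =>
    intro k hk hdrop
    have hlen : ns.length ≤ k + 1 := List.drop_eq_nil_iff.mp hdrop.symm
    have hke : k = ns.length - 1 := by omega
    subst hke
    simp [pvGoA]
  | cons v t ih =>
    intro k hk hdrop
    have hlt : k + 1 < ns.length := by
      have := congrArg List.length hdrop
      simp [List.length_drop] at this
      omega
    rw [pv_drop_cons ns hlt] at hdrop
    injection hdrop with hv ht
    subst hv ht
    simp only [pvGoA]
    have e0 : max (ns.getD (k+1) 0) (pvEv ns k + ns.getD (k+1) 0) = pvEv ns (k+1) := by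
      simp [pvEv, pvG]
    have e1 : max (ns.getD (k+1) 0 * x) (max (pvEv ns k + ns.getD (k+1) 0 * x)
        (pvCv ns x k + ns.getD (k+1) 0)) = pvCv ns x (k+1) := by
      simp [pvCv, pvG]
    have e2 : max (pvAns ns x k) (max (pvEv ns (k+1)) (pvCv ns x (k+1))) = pvAns ns x (k+1) := by
      simp [pvAns]
    rw [e0, e1, e2]
    exact ih (k+1) hlt rfl

lemma portA_eq (ns : List Int) (x : Int) (h : ns ≠ []) :
    max_subarray_sum_after_one_operation ns x = pvAns ns x (ns.length - 1) := by
  obtain ⟨v, rest, rfl⟩ := List.exists_cons_of_ne_nil h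
  have e0 : pvEv (v :: rest) 0 = v := by simp [pvEv, pvG]
  have e1 : pvCv (v :: rest) x 0 = v * x := by simp [pvCv, pvG]
  have e2 : pvAns (v :: rest) x 0 = max v (v * x) := by simp [pvAns, e0, e1]
  have hinit : (v, v * x, max v (v * x))
      = (pvEv (v :: rest) 0, pvCv (v :: rest) x 0, pvAns (v :: rest) x 0) := by
    rw [e0, e1, e2]
  show (pvGoA x (v, v * x, max v (v * x)) rest).2.2 = _
  rw [hinit, pvGoA_inv (v :: rest) x rest 0 (by simp) rfl]

-- B's arrays characterised
lemma pvBuildL_eq (ns : List Int) :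
    ∀ (l : List Int) (k : ℕ), l = ns.drop (k+1) →
    pvBuildL (pvEv ns k) l = (List.range l.length).map (fun j => pvEv ns (k+1+j)) := by
  intro l
  induction l with
  | nil => intro k _; simp [pvBuildL]
  | cons v t ih =>
    intro k hdrop
    have hlt : k + 1 < ns.length := by
      have := congrArg List.length hdrop
      simp [List.length_drop] at this
      omega
    rw [pv_drop_cons ns hlt] at hdrop
    injection hdrop with hv ht
    subst hv ht
    simp only [pvBuildL]
    have e0 : max (ns.getD (k+1) 0) (pvEv ns k + ns.getD (k+1) 0) = pvEv ns (k+1) := by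
      simp [pvEv, pvG]
    rw [e0, ih (k+1) rfl]
    rw [List.length_cons, map_range_succ_shift]
    congr 1
    exact List.map_congr_left (fun a _ => by congr 1; omega)

lemma pvBuildR_eq : ∀ l : List Int,
    pvBuildR l = (List.range l.length).map (fun j => pvSv (l.drop j)) := by
  intro l
  induction l with
  | nil => simp [pvBuildR]
  | cons v t ih =>
    cases t with
    | nil => simp [pvBuildR, pvSv]
    | cons w t' =>
      simp only [pvBuildR]
      rw [ih]
      have hhead : ((List.range (w :: t').length).map (fun j => pvSv ((w :: t').drop j))).headD 0
          = pvSv (w :: t') := by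
        rw [List.length_cons, List.range_succ_eq_map]
        simp
      rw [hhead]
      have hmax : max v (v + pvSv (w :: t')) = pvSv (v :: w :: t') := by simp [pvSv]
      rw [hmax]
      have hlen : (v :: w :: t').length = (w :: t').length + 1 := rfl
      rw [hlen, map_range_succ_shift]
      congr 1

-- characterisation of pvCv / pvSv as maxima of segment sums (bounds + attainment)
lemma pvCv_succ_eq (ns : List Int) (x : Int) (i : ℕ) :
    pvCv ns x (i+1) = max (pvLeft ns (i+1) + pvG ns (i+1) * x) (pvCv ns x i + pvG ns (i+1)) := by
  simp only [pvCv, pvLeft, Nat.succ_pos, if_pos, Nat.add_sub_cancel]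
  generalize pvG ns (i+1) * x = a
  generalize pvEv ns i = b
  generalize pvCv ns x i + pvG ns (i+1) = c
  simp only [max_def]
  split_ifs <;> omega

lemma pvCv_lb (ns : List Int) (x : Int) {j i : ℕ} (h : j ≤ i) :
    pvLeft ns j + pvG ns j * x + pvSeg ns (j+1) (i+1) ≤ pvCv ns x i := by
  induction i with
  | zero =>
    have hj : j = 0 := Nat.le_zero.mp h
    subst hj
    rw [pvSeg_self]
    simp [pvLeft, pvCv]
  | succ i ih =>
    rw [pvCv_succ_eq]
    rcases Nat.lt_or_ge j (i+1) with hlt | hge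
    · rw [pvSeg_succ_top ns (by omega : j+1 ≤ i+1)]
      refine le_trans ?_ (le_max_right _ _)
      have h1 : pvLeft ns j + pvG ns j * x + (pvSeg ns (j+1) (i+1) + pvG ns (i+1))
          = (pvLeft ns j + pvG ns j * x + pvSeg ns (j+1) (i+1)) + pvG ns (i+1) := by ring
      rw [h1]
      gcongr
      exact ih (by omega)
    · have hj : j = i + 1 := by omega
      subst hj
      rw [pvSeg_self, add_zero]
      exact le_max_left _ _

lemma pvCv_att (ns : List Int) (x : Int) (i : ℕ) :
    ∃ j, j ≤ i ∧ pvCv ns x i = pvLeft ns j + pvG ns j * x + pvSeg ns (j+1) (i+1) := by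
  induction i with
  | zero => exact ⟨0, le_rfl, by simp [pvCv, pvLeft, pvSeg_self]⟩
  | succ i ih =>
    rw [pvCv_succ_eq]
    rcases max_cases (pvLeft ns (i+1) + pvG ns (i+1) * x) (pvCv ns x i + pvG ns (i+1)) with
      ⟨heq, _⟩ | ⟨heq, _⟩
    · exact ⟨i+1, le_rfl, by rw [heq, pvSeg_self, add_zero]⟩
    · obtain ⟨j, hj, hcv⟩ := ih
      refine ⟨j, by omega, ?_⟩
      rw [heq, hcv, pvSeg_succ_top ns (by omega : j+1 ≤ i+1)]
      ring

lemma pvSv_last (ns : List Int) {k : ℕ} (h : k + 1 = ns.length) :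
    pvSv (ns.drop k) = pvG ns k := by
  rw [pv_drop_cons ns (by omega), List.drop_eq_nil_iff.mpr (by omega)]
  simp [pvSv, pvG]

lemma pvSv_step (ns : List Int) {k : ℕ} (h : k + 1 < ns.length) :
    pvSv (ns.drop k) = max (pvG ns k) (pvG ns k + pvSv (ns.drop (k+1))) := by
  rw [pv_drop_cons ns (by omega : k < ns.length), pv_drop_cons ns h]
  simp [pvSv, pvG]

lemma pvSv_diag (ns : List Int) {k : ℕ} (h : k < ns.length) :
    pvSeg ns k (k+1) ≤ pvSv (ns.drop k) := by
  rw [pvSeg_single]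
  rcases Nat.lt_or_ge (k+1) ns.length with hlt | hge
  · rw [pvSv_step ns hlt]
    exact le_max_left _ _
  · rw [pvSv_last ns (by omega)]

lemma pvSv_lb_aux (ns : List Int) :
    ∀ d k i, k ≤ i → i < ns.length → i - k ≤ d → pvSeg ns k (i+1) ≤ pvSv (ns.drop k) := by
  intro d
  induction d with
  | zero =>
    intro k i h1 h2 h3
    have hk : k = i := by omega
    subst hk
    exact pvSv_diag ns h2
  | succ d ih =>
    intro k i h1 h2 h3
    rcases Nat.lt_or_ge k i with hlt | hge
    · have hk1 : k + 1 < ns.length := by omega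
      rw [pvSv_step ns hk1]
      refine le_trans ?_ (le_max_right _ _)
      rw [pvSeg_split ns (by omega : k ≤ k+1) (by omega : k+1 ≤ i+1), pvSeg_single]
      gcongr
      exact ih (k+1) i (by omega) h2 (by omega)
    · have hk : k = i := by omega
      subst hk
      exact pvSv_diag ns h2

lemma pvSv_lb (ns : List Int) {k i : ℕ} (h1 : k ≤ i) (h2 : i < ns.length) :
    pvSeg ns k (i+1) ≤ pvSv (ns.drop k) :=
  pvSv_lb_aux ns (i - k) k i h1 h2 le_rfl

lemma pvSv_att_aux (ns : List Int) :
    ∀ d k, k < ns.length → ns.length - k ≤ d →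
    ∃ i, k ≤ i ∧ i < ns.length ∧ pvSv (ns.drop k) = pvSeg ns k (i+1) := by
  intro d
  induction d with
  | zero => intro k h1 h2; omega
  | succ d ih =>
    intro k h1 h2
    rcases Nat.lt_or_ge (k+1) ns.length with hlt | hge
    · rw [pvSv_step ns hlt]
      rcases max_cases (pvG ns k) (pvG ns k + pvSv (ns.drop (k+1))) with ⟨heq, _⟩ | ⟨heq, _⟩
      · exact ⟨k, le_rfl, h1, by rw [heq, pvSeg_single]⟩
      · obtain ⟨i, hi1, hi2, hsv⟩ := ih (k+1) hlt (by omega)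
        refine ⟨i, by omega, hi2, ?_⟩
        rw [heq, hsv, pvSeg_split ns (by omega : k ≤ k+1) (by omega : k+1 ≤ i+1), pvSeg_single]
    · exact ⟨k, le_rfl, h1, by rw [pvSv_last ns (by omega), pvSeg_single]⟩

lemma pvSv_att (ns : List Int) {k : ℕ} (h : k < ns.length) :
    ∃ i, k ≤ i ∧ i < ns.length ∧ pvSv (ns.drop k) = pvSeg ns k (i+1) :=
  pvSv_att_aux ns (ns.length - k) k h le_rfl

-- pvAns bounds
lemma pvEv_le_ans (ns : List Int) (x : Int) {i m : ℕ} (h : i ≤ m) : pvEv ns i ≤ pvAns ns x m := by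
  induction m with
  | zero =>
    have hi : i = 0 := Nat.le_zero.mp h
    subst hi
    exact le_max_left _ _
  | succ m ih =>
    rcases Nat.lt_or_ge i (m+1) with hlt | hge
    · exact le_trans (ih (by omega)) (by simp [pvAns])
    · have hi : i = m + 1 := by omega
      subst hi
      simp only [pvAns]
      exact le_trans (le_max_left _ _) (le_max_right _ _)

lemma pvCv_le_ans (ns : List Int) (x : Int) {i m : ℕ} (h : i ≤ m) : pvCv ns x i ≤ pvAns ns x m := by
  induction m with
  | zero =>
    have hi : i = 0 := Nat.le_zero.mp h
    subst hi
    exact le_max_right _ _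
  | succ m ih =>
    rcases Nat.lt_or_ge i (m+1) with hlt | hge
    · exact le_trans (ih (by omega)) (by simp [pvAns])
    · have hi : i = m + 1 := by omega
      subst hi
      simp only [pvAns]
      exact le_trans (le_max_right _ _) (le_max_right _ _)

lemma pvAns_le (ns : List Int) (x : Int) {m : ℕ} {M : Int}
    (h : ∀ i, i ≤ m → pvEv ns i ≤ M ∧ pvCv ns x i ≤ M) : pvAns ns x m ≤ M := by
  induction m with
  | zero => exact max_le (h 0 le_rfl).1 (h 0 le_rfl).2
  | succ m ih =>
    simp only [pvAns]
    exact max_le (ih (fun i hi => h i (by omega)))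
      (max_le (h (m+1) le_rfl).1 (h (m+1) le_rfl).2)

-- foldl-max plumbing
lemma foldl_max_cases (l : List Int) (a : Int) : l.foldl max a = a ∨ l.foldl max a ∈ l := by
  induction l generalizing a with
  | nil => exact Or.inl rfl
  | cons v t ih =>
    simp only [List.foldl_cons]
    rcases ih (max a v) with h | h
    · rw [h]
      rcases max_cases a v with ⟨he, _⟩ | ⟨he, _⟩
      · exact Or.inl he
      · rw [he]
        exact Or.inr (List.mem_cons_self ..)
    · exact Or.inr (List.mem_cons_of_mem _ h)

-- the main equivalence on nonempty lists
lemma foldl_maxF_eq (F : ℕ → Int) (l : List ℕ) (a : Int) :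
    l.foldl (fun b j => max b (F j)) a = (l.map F).foldl max a :=
  (List.foldl_map).symm

lemma main_eq (ns : List Int) (x : Int) (h : ns ≠ []) :
    max_subarray_sum_after_one_operation ns x = max_subarray_sum_after_one_operation_alt ns x := by
  obtain ⟨v, rest, rfl⟩ := List.exists_cons_of_ne_nil h
  have e0 : pvEv (v :: rest) 0 = v := by simp [pvEv, pvG]
  have hLtail : pvBuildL v rest
      = (List.range rest.length).map (fun j => pvEv (v :: rest) (1 + j)) := by
    have hb := pvBuildL_eq (v :: rest) rest 0 rfl
    rw [e0] at hb
    simpa using hb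
  have hL : ∀ j : ℕ, j < rest.length + 1 →
      (v :: pvBuildL v rest).getD j 0 = pvEv (v :: rest) j := by
    intro j hj
    cases j with
    | zero => simpa using e0.symm
    | succ j =>
      rw [List.getD_cons_succ, hLtail, PySem.List.getD_map_range _ _ _ _ (by omega)]
      congr 1
      omega
  have hR : ∀ j : ℕ, j < rest.length + 1 →
      (pvBuildR (v :: rest)).getD j 0 = pvSv ((v :: rest).drop j) := by
    intro j hj
    rw [pvBuildR_eq]
    exact PySem.List.getD_map_range _ _ _ _ (by simpa using hj)
  have hag : ∀ j : ℕ, j < rest.length + 1 →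
      ((if 0 < j then max ((v :: pvBuildL v rest).getD (j - 1) 0) 0 else 0)
        + (v :: rest).getD j 0 * x
        + (if j < (v :: rest).length - 1 then max ((pvBuildR (v :: rest)).getD (j + 1) 0) 0 else 0))
      = pvTerm (v :: rest) x j := by
    intro j hj
    unfold pvTerm pvLeft pvRight pvG
    congr 1
    · congr 1
      split_ifs with h0
      · rw [hL (j-1) (by omega)]
      · rfl
    · split_ifs with h1
      · rw [hR (j+1) (by simp only [List.length_cons] at h1 ⊢; omega)]
      · rfl
  have hBval : max_subarray_sum_after_one_operation_alt (v :: rest) x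
      = ((List.range ((v :: rest).length)).map (pvTerm (v :: rest) x)).foldl max
          ((pvBuildL v rest).foldl max v) := by
    simp only [max_subarray_sum_after_one_operation_alt, List.tail_cons]
    rw [foldl_maxF_eq]
    congr 1
    apply List.map_congr_left
    intro j hj
    exact hag j (by simpa using List.mem_range.mp hj)
  rw [portA_eq _ x (by simp), hBval]
  have hlen : (v :: rest).length = rest.length + 1 := by simp
  rw [hlen, Nat.add_sub_cancel]
  apply le_antisymm
  · apply pvAns_le
    have hEb : ∀ i', i' ≤ rest.length → pvEv (v :: rest) i' ≤ (pvBuildL v rest).foldl max v := by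
      intro i' hi'
      cases i' with
      | zero =>
        rw [e0]
        exact (PySem.List.le_foldl_max _ v).1
      | succ i' =>
        refine (PySem.List.le_foldl_max _ v).2 _ ?_
        rw [hLtail]
        exact List.mem_map.mpr ⟨i', List.mem_range.mpr (by omega), by congr 1; omega⟩
    intro i hi
    constructor
    · exact le_trans (hEb i hi) (PySem.List.le_foldl_max _ _).1
    · obtain ⟨j, hji, hcv⟩ := pvCv_att (v :: rest) x i
      have hterm : pvCv (v :: rest) x i ≤ pvTerm (v :: rest) x j := by
        rw [hcv]
        unfold pvTerm
        gcongr
        unfold pvRight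
        split_ifs with h1
        · rcases Nat.lt_or_ge j i with hlt | hge
          · refine le_trans (pvSv_lb (v :: rest) (by omega) ?_) (le_max_left _ _)
            simp only [List.length_cons]
            omega
          · have hje : j = i := by omega
            subst hje
            rw [pvSeg_self]
            exact le_max_right _ _
        · have hje : j = i := by
            simp only [List.length_cons, Nat.add_sub_cancel] at h1
            omega
          subst hje
          rw [pvSeg_self]
      refine le_trans hterm ((PySem.List.le_foldl_max _ _).2 _ ?_)
      exact List.mem_map.mpr ⟨j, List.mem_range.mpr (by omega), rfl⟩
  · rcases foldl_max_cases ((List.range (rest.length + 1)).map (pvTerm (v :: rest) x))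
        ((pvBuildL v rest).foldl max v) with hB | hB
    · rw [hB]
      rcases foldl_max_cases (pvBuildL v rest) v with hb | hb
      · rw [hb, ← e0]
        exact pvEv_le_ans _ x (Nat.zero_le _)
      · rw [hLtail] at hb
        obtain ⟨j, hjm, hje⟩ := List.mem_map.mp hb
        rw [hLtail, ← hje]
        exact pvEv_le_ans _ x (by have := List.mem_range.mp hjm; omega)
    · obtain ⟨j, hjm, hje⟩ := List.mem_map.mp hB
      rw [← hje]
      have hj : j < rest.length + 1 := by simpa using List.mem_range.mp hjm
      have hbase : ∀ i, j ≤ i → i ≤ rest.length →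
          pvLeft (v :: rest) j + pvG (v :: rest) j * x + pvSeg (v :: rest) (j+1) (i+1)
            ≤ pvAns (v :: rest) x rest.length :=
        fun i h1 h2 => le_trans (pvCv_lb _ x h1) (pvCv_le_ans _ x h2)
      unfold pvTerm pvRight
      split_ifs with h1
      · simp only [List.length_cons, Nat.add_sub_cancel] at h1
        rcases max_cases (pvSv ((v :: rest).drop (j+1))) 0 with ⟨heq, _⟩ | ⟨heq, _⟩
        · rw [heq]
          obtain ⟨i, hi1, hi2, hsv⟩ := pvSv_att (v :: rest) (k := j+1)
            (by simp only [List.length_cons]; omega)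
          rw [hsv]
          simp only [List.length_cons] at hi2
          exact hbase i (by omega) (by omega)
        · rw [heq]
          have h2 := hbase j le_rfl (by omega)
          rw [pvSeg_self] at h2
          exact h2
      · have h2 := hbase j le_rfl (by omega)
        rw [pvSeg_self] at h2
        exact h2

-- ===== VERDICT (by name: the statement is the Claim_ definition above) =====
theorem max_subarray_sum_after_one_operation_spec : Claim_equal_max_subarray_sum_after_one_operation := by
  intro nums x _ hpre
  unfold Spec_max_subarray_sum_after_one_operation
  exact main_eq nums x hpre
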